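-- pv_equiv track=rewrite | github.com/danielgafni/repalette | repalette/utils/build_rgb.py | find_edges
-- ===== SOURCE A (Python) =====
-- def find_edges(array, edge_size=10):
--     edges = []
--     for i, idx in enumerate(array):
--         for delta in range(1, min(edge_size, len(array) - i)):
--             if not array[i + delta] == idx + delta:
--                 break
--             edges.append(idx)
--     return edges
-- ===== SOURCE B (Python) =====
-- def find_edges(array, edge_size=10):
--     # One backward pass builds a run-length table L (L[i] = number of
--     # consecutive +1 steps following index i), then one forward pass emits
--     # array[i] exactly min(L[i], edge_size - 1) times.
--     n = len(array)
--     L = [0] * n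
--     for i in range(n - 2, -1, -1):
--         if array[i + 1] == array[i] + 1:
--             L[i] = L[i + 1] + 1
--     out = []
--     for i in range(n):
--         c = min(L[i], edge_size - 1)
--         if c > 0:
--             out.extend([array[i]] * c)
--     return out
-- ===== Notes on version B (the rewrite author's own statement) =====
-- stated objective: faster
-- what changed: Replaces A's nested forward re-scan (for each index, re-walk up to edge_size-1 successors checking array[i+delta]==array[i]+delta, appending one element at a time) with a single backward pass building a run-length table L[i] of consecutive +1 steps, then a forward pass emitting array[i] exactly min(L[i], edge_size-1) times via one extend.
import Mathlib
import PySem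

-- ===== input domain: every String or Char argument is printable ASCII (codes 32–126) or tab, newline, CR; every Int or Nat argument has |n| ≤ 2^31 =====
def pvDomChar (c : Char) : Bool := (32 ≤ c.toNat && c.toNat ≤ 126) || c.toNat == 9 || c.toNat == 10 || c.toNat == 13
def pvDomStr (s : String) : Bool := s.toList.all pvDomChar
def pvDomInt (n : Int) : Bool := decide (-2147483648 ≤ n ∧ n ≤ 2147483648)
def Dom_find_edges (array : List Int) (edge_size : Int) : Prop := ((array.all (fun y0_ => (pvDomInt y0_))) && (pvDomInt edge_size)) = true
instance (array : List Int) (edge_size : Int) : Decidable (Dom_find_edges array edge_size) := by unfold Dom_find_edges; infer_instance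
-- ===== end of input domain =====

-- B replaces A's nested forward re-scan by a backward run-length table plus one
-- emitting pass (alternative decomposition, same output).

-- ===== PORT A =====
-- inner 'for delta in range(...)' loop with break: appends idx while the chain holds
def pvInnerA (array : List Int) (i idx : Int) : List Int → List Int → List Int
  | [], edges => edges
  | d :: ds, edges =>
    if PySem.List.pyGet? array (i + d) = some (idx + d)
    then pvInnerA array i idx ds (edges ++ [idx])
    else edges

def find_edges (array : List Int) (edge_size : Int) : List Int :=
  (PySem.List.enumerate array).foldl
    (fun edges p =>
      pvInnerA array p.1 p.2
        (PySem.List.pyRange 1 (min edge_size ((array.length : Int) - p.1))) edges)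
    []

-- ===== PORT B =====
-- backward pass of Source B: L[i] = L[i+1]+1 if array[i+1] == array[i]+1 else 0
def pvRunTable : List Int → List Nat
  | [] => []
  | [_] => [0]
  | a :: b :: rest =>
    match pvRunTable (b :: rest) with
    | l :: ls => (if b = a + 1 then l + 1 else 0) :: l :: ls
    | [] => [0]

def find_edges_alt (array : List Int) (edge_size : Int) : List Int :=
  (array.zip (pvRunTable array)).foldl
    (fun out p =>
      let c : Int := min (p.2 : Int) (edge_size - 1)
      if 0 < c then out ++ List.replicate c.toNat p.1 else out)
    []

-- ===== PRECONDITION & SPEC =====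
def Spec_find_edges (array : List Int) (edge_size : Int) (out : List Int) : Prop := out = find_edges_alt array edge_size
instance (array : List Int) (edge_size : Int) (out : List Int) : Decidable (Spec_find_edges array edge_size out) := by unfold Spec_find_edges; infer_instance

-- ===== CLAIM (what is proved, stated in full; the proofs are below) =====
def Claim_equal_find_edges : Prop := ∀ (array : List Int) (edge_size : Int), Dom_find_edges array edge_size → Spec_find_edges array edge_size (find_edges array edge_size)

-- ===== LEMMAS AND PROOFS =====

-- length of the increasing +1 run at the head of s, starting after value x
def pvStreak : List Int → Int → Nat
  | [], _ => 0
  | y :: ys, x => if y = x + 1 then pvStreak ys (x + 1) + 1 else 0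

lemma pvStreak_le (s : List Int) (x : Int) : pvStreak s x ≤ s.length := by
  induction s generalizing x with
  | nil => simp [pvStreak]
  | cons y ys ih =>
    simp only [pvStreak, List.length_cons]
    split
    · exact Nat.succ_le_succ (ih _)
    · exact Nat.zero_le _

lemma pvRunTable_cons (a : Int) (rest : List Int) :
    pvRunTable (a :: rest) = pvStreak rest a :: pvRunTable rest := by
  induction rest generalizing a with
  | nil => simp [pvRunTable, pvStreak]
  | cons b rs ih =>
    rw [show pvRunTable (a :: b :: rs) =
      (match pvRunTable (b :: rs) with
       | l :: ls => (if b = a + 1 then l + 1 else 0) :: l :: ls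
       | [] => [0]) from rfl, ih b]
    simp only [pvStreak]
    split <;> rename_i h
    · simp [h]
    · simp

lemma pvInnerA_append (array : List Int) (i idx : Int) (ds edges : List Int) :
    pvInnerA array i idx ds edges = edges ++ pvInnerA array i idx ds [] := by
  induction ds generalizing edges with
  | nil => simp [pvInnerA]
  | cons d ds ih =>
    simp only [pvInnerA]
    split
    · rw [ih (edges ++ [idx]), ih ([] ++ [idx])]; simp
    · simp

lemma pvInner_spec (arr : List Int) (i : Nat) (idx : Int) :
    ∀ (n : Nat) (d m : Int), 1 ≤ d → (m - d).toNat = n → m ≤ (arr.length : Int) - i →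
    pvInnerA arr (i : Int) idx (PySem.List.pyRange d m) [] =
    List.replicate (min (pvStreak (arr.drop ((i : Int) + d).toNat) (idx + d - 1)) n) idx := by
  intro n
  induction n with
  | zero =>
    intro d m hd hn hm
    rw [PySem.List.pyRange_one_eq_nil (by omega)]
    simp [pvInnerA]
  | succ k ih =>
    intro d m hd hn hm
    have hdm : d < m := by omega
    rw [PySem.List.pyRange_one_cons hdm]
    have hjlt : ((i : Int) + d).toNat < arr.length := by omega
    have hjcast : ((i : Int) + d) = (((((i : Int) + d).toNat) : Nat) : Int) := by omega
    have hget : PySem.List.pyGet? arr ((i : Int) + d) = arr[((i : Int) + d).toNat]? := by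
      have h3 := PySem.List.pyGet?_natCast arr ((i : Int) + d).toNat
      rw [← hjcast] at h3
      exact h3
    have hdrop : arr.drop ((i : Int) + d).toNat =
        arr[((i : Int) + d).toNat] :: arr.drop (((i : Int) + d).toNat + 1) :=
      List.drop_eq_getElem_cons hjlt
    simp only [pvInnerA, hget]
    by_cases hEq : arr[((i : Int) + d).toNat] = idx + d
    · rw [if_pos (by rw [List.getElem?_eq_getElem hjlt, hEq])]
      rw [pvInnerA_append]
      have := ih (d + 1) m (by omega) (by omega) hm
      have hsuf : ((i : Int) + (d + 1)).toNat = ((i : Int) + d).toNat + 1 := by omega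
      rw [hsuf] at this
      rw [show idx + (d + 1) - 1 = idx + d by ring] at this
      rw [this, hdrop]
      simp only [pvStreak]
      rw [if_pos (by rw [hEq]; ring)]
      rw [show idx + d - 1 + 1 = idx + d by ring]
      rw [Nat.succ_min_succ]
      simp [List.replicate_succ]
    · rw [if_neg (by rw [List.getElem?_eq_getElem hjlt]; exact fun h => hEq (Option.some.inj h))]
      rw [hdrop]
      simp only [pvStreak]
      rw [if_neg (by rw [show idx + d - 1 + 1 = idx + d by ring]; exact hEq)]
      simp

-- the common reference: emit each element min(streak, edge_size-1) times
def pvEmit (e : Int) : List Int → List Int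
  | [] => []
  | a :: rest =>
    List.replicate (min ((pvStreak rest a : Int)) (e - 1)).toNat a ++ pvEmit e rest

lemma pvA_general (e : Int) :
    ∀ (suf arr : List Int) (s : Nat), arr.drop s = suf →
    (PySem.List.enumerate suf (s : Int)).flatMap
      (fun p => pvInnerA arr p.1 p.2
        (PySem.List.pyRange 1 (min e ((arr.length : Int) - p.1))) []) = pvEmit e suf := by
  intro suf
  induction suf with
  | nil => intro arr s h; simp [PySem.List.enumerate, pvEmit]
  | cons a rest ih =>
    intro arr s h
    have hs : s < arr.length := by
      by_contra hge
      rw [List.drop_eq_nil_of_le (by omega)] at h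
      exact List.cons_ne_nil a rest h.symm
    have hlen : arr.length - s = rest.length + 1 := by
      have := congrArg List.length h
      simp [List.length_drop] at this
      omega
    have hdrop1 : arr.drop (s + 1) = rest := by
      have h2 := congrArg (List.drop 1) h
      rw [List.drop_drop] at h2
      simpa using h2
    rw [PySem.List.enumerate_cons, List.flatMap_cons]
    have hm : min e ((arr.length : Int) - s) ≤ (arr.length : Int) - s := min_le_right _ _
    have hchunk := pvInner_spec arr s a ((min e ((arr.length : Int) - s) - 1).toNat) 1
      (min e ((arr.length : Int) - s)) (le_refl 1) rfl hm
    rw [show ((s : Int) + 1).toNat = s + 1 by omega, hdrop1,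
      show a + 1 - 1 = a by ring] at hchunk
    rw [hchunk]
    have hcast : (s : Int) + 1 = ((s + 1 : Nat) : Int) := by push_cast; ring
    rw [hcast, ih arr (s + 1) hdrop1]
    simp only [pvEmit]
    congr 1
    congr 1
    have hk : pvStreak rest a ≤ rest.length := pvStreak_le rest a
    omega

lemma pvA_eq_emit (arr : List Int) (e : Int) : find_edges arr e = pvEmit e arr := by
  unfold find_edges
  have hbody : (fun (edges : List Int) (p : Int × Int) =>
      pvInnerA arr p.1 p.2 (PySem.List.pyRange 1 (min e ((arr.length : Int) - p.1))) edges)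
      = fun edges p => edges ++ pvInnerA arr p.1 p.2
        (PySem.List.pyRange 1 (min e ((arr.length : Int) - p.1))) [] := by
    funext edges p
    exact pvInnerA_append _ _ _ _ _
  rw [hbody, PySem.List.foldl_append_eq_flatMap]
  rw [List.nil_append]
  exact pvA_general e arr arr 0 (by simp)

lemma pvAlt_flatMap (arr : List Int) (e : Int) :
    find_edges_alt arr e = (arr.zip (pvRunTable arr)).flatMap
      (fun p => List.replicate (min (p.2 : Int) (e - 1)).toNat p.1) := by
  unfold find_edges_alt
  have hbody : (fun (out : List Int) (p : Int × Nat) =>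
      let c : Int := min (p.2 : Int) (e - 1)
      if 0 < c then out ++ List.replicate c.toNat p.1 else out)
      = fun out p => out ++ List.replicate (min (p.2 : Int) (e - 1)).toNat p.1 := by
    funext out p
    simp only []
    split <;> rename_i hc
    · rfl
    · rw [show (min (p.2 : Int) (e - 1)).toNat = 0 by omega]
      simp
  rw [hbody, PySem.List.foldl_append_eq_flatMap, List.nil_append]

lemma pvB_eq_emit (arr : List Int) (e : Int) : find_edges_alt arr e = pvEmit e arr := by
  induction arr with
  | nil => simp [pvAlt_flatMap, pvRunTable, pvEmit]
  | cons a rest ih =>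
    rw [pvAlt_flatMap] at ih ⊢
    rw [pvRunTable_cons, List.zip_cons_cons, List.flatMap_cons, ih]
    simp [pvEmit]

-- ===== VERDICT (by name: the statement is the Claim_ definition above) =====
theorem find_edges_spec : Claim_equal_find_edges := by
  intro array edge_size _
  unfold Spec_find_edges
  rw [pvA_eq_emit, pvB_eq_emit]
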